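-- pv_equiv track=rewrite | github.com/JessiDG/is_anachronistic_web.py | find_anachronistic_words.py | to_unique_set
-- ===== SOURCE A (Python) =====
-- import string
--
-- def to_unique_set(text):
--     if type(text) is not str:
--         raise TypeError("Please input a string")
--
--     to_remove = string.punctuation + '-' + "\”" + "\"" + "\'" + "“" + "‘" + "’" + string.digits
--     stripped_string = ""
--     for char in str(text):
--         if char in to_remove:
--             stripped_string += ' '
--         else:
--             stripped_string += char.lower()
--
--     list_stripped_string = stripped_string.split()
--
--     unique_words_set = set(list_stripped_string)
--     return unique_words_set
-- ===== SOURCE B (Python) =====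
-- import string
--
-- def to_unique_set(text):
--     if type(text) is not str:
--         raise TypeError("Please input a string")
--     seps = set(string.punctuation + '-' + "\”" + "\"" + "\'" + "“" + "‘" + "’" + string.digits)
--     words = set()
--     i, n = 0, len(text)
--     while i < n:
--         if text[i] in seps or text[i].isspace():
--             i += 1
--         else:
--             j = i + 1
--             while j < n and text[j] not in seps and not text[j].isspace():
--                 j += 1
--             words.add(text[i:j].lower())
--             i = j
--     return words
-- ===== Notes on version B (the rewrite author's own statement) =====
-- stated objective: alternative
-- what changed: Instead of building a translated copy of the text and splitting it, B scans with two index pointers, extracting each maximal run of non-separator characters directly as a word slice and lowercasing only the word, collecting into a set in one pass with no intermediate stripped string and no split.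
import Mathlib
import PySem

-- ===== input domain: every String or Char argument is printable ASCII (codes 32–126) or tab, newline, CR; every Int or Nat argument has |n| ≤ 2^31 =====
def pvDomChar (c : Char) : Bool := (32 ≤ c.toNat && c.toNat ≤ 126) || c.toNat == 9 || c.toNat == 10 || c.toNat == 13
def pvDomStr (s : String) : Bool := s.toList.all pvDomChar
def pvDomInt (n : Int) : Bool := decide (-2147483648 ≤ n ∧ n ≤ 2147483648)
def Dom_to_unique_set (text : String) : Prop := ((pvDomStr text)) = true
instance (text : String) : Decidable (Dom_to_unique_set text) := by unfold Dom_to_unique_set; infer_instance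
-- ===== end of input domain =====

-- B replaces A's replace-then-split pipeline (build a stripped copy of the whole text, then
-- str.split) by a two-pointer scan that extracts each maximal run of non-separator characters
-- directly as a word and lowercases only the words (objective: alternative).

-- ===== PORT A =====
-- string.punctuation + '-' + '”' + '"' + "'" + '“' + '‘' + '’' + string.digits
def pvToRemoveA : List Char := "!\"#$%&'()*+,-./:;<=>?@[\\]^_`{|}~-”\"'“‘’0123456789".toList

def to_unique_set (text : String) : List String :=
  let stripped : List Char := text.toList.foldl
    (fun acc c => acc ++ (if pvToRemoveA.contains c then [' '] else [PySem.Chars.lowerChar c])) []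
  PySem.Set.ofList (PySem.Str.split₀ (String.ofList stripped))

-- ===== PORT B =====
-- the separator test of Source B: membership in the `seps` set, or whitespace
def pvRemoveB : List Char := "!\"#$%&'()*+,-./:;<=>?@[\\]^_`{|}~-”\"'“‘’0123456789".toList

def pvIsSepB (c : Char) : Bool := pvRemoveB.contains c || PySem.Chars.isspace c

-- Source B's two-pointer scan: `cur` is the (reversed) run of original characters between the two
-- pointers; at a separator the finished run text[i:j] is emitted, then the scan continues.
def pvScanB : List Char → List Char → List (List Char)
  | [], cur => if cur.isEmpty then [] else [cur.reverse]
  | c :: rest, cur =>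
    if pvIsSepB c then
      (if cur.isEmpty then pvScanB rest [] else cur.reverse :: pvScanB rest [])
    else pvScanB rest (c :: cur)

def to_unique_set_alt (text : String) : List String :=
  PySem.Set.ofList
    ((pvScanB text.toList []).map (fun w => String.ofList (PySem.Chars.lower w)))

-- ===== PRECONDITION & SPEC =====
def Spec_to_unique_set (text : String) (out : List String) : Prop := out = to_unique_set_alt text
instance (text : String) (out : List String) : Decidable (Spec_to_unique_set text out) := by unfold Spec_to_unique_set; infer_instance

-- ===== CLAIM (what is proved, stated in full; the proofs are below) =====
def Claim_equal_to_unique_set : Prop := ∀ (text : String), Dom_to_unique_set text → Spec_to_unique_set text (to_unique_set text)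

-- ===== LEMMAS AND PROOFS =====
-- the per-character translation A applies
def pvG (c : Char) : Char := if pvToRemoveA.contains c then ' ' else PySem.Chars.lowerChar c

lemma pv_foldl_app (l : List Char) (acc : List Char) :
    l.foldl (fun a c => a ++ (if pvToRemoveA.contains c then [' '] else [PySem.Chars.lowerChar c])) acc
      = acc ++ l.map pvG := by
  induction l generalizing acc with
  | nil => simp
  | cons c t ih =>
    rw [List.foldl_cons, ih, List.map_cons, List.append_assoc]
    congr 1
    unfold pvG
    by_cases h : pvToRemoveA.contains c = true
    · rw [if_pos h, if_pos h]; rfl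
    · rw [if_neg h, if_neg h]; rfl

lemma pv_isspace_lowerChar (c : Char) :
    PySem.Chars.isspace (PySem.Chars.lowerChar c) = PySem.Chars.isspace c := by
  unfold PySem.Chars.lowerChar
  by_cases h : PySem.Chars.isupper c = true
  · have hc : 65 ≤ c.toNat ∧ c.toNat ≤ 90 := by
      unfold PySem.Chars.isupper at h
      simp only [Bool.and_eq_true, decide_eq_true_eq, Char.le_def, UInt32.le_iff_toNat_le] at h
      exact h
    have hv : (c.toNat + 32).isValidChar := by
      unfold Nat.isValidChar
      left; omega
    rw [if_pos h]
    have hL : PySem.Chars.isspace (Char.ofNat (c.toNat + 32)) = false := by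
      unfold PySem.Chars.isspace
      simp only [Char.toNat_ofNat, if_pos hv, Bool.or_eq_false_iff, Bool.and_eq_false_iff,
        decide_eq_false_iff_not]
      omega
    have hR : PySem.Chars.isspace c = false := by
      unfold PySem.Chars.isspace
      simp only [Bool.or_eq_false_iff, Bool.and_eq_false_iff, decide_eq_false_iff_not]
      omega
    rw [hL, hR]
  · rw [if_neg h]

lemma pv_isspace_g (c : Char) :
    PySem.Chars.isspace (pvG c) = pvIsSepB c := by
  unfold pvG pvIsSepB
  have hRB : pvRemoveB.contains c = pvToRemoveA.contains c := rfl
  by_cases h : pvToRemoveA.contains c = true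
  · rw [if_pos h, hRB, h, Bool.true_or]; decide
  · rw [if_neg h, hRB, Bool.eq_false_iff.mpr h, Bool.false_or, pv_isspace_lowerChar]

-- the central invariant: Python's split() on A's translated text produces exactly the
-- lowercased runs of B's two-pointer scan
lemma pv_split_scan (l cur : List Char) (acc : List (List Char)) :
    PySem.Chars.split₀.go (l.map pvG) (cur.map PySem.Chars.lowerChar) acc
      = acc.reverse ++ (pvScanB l cur).map PySem.Chars.lower := by
  induction l generalizing cur acc with
  | nil =>
    simp only [List.map_nil, PySem.Chars.split₀.go, pvScanB, List.isEmpty_map]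
    by_cases h : cur.isEmpty = true
    · simp [h]
    · simp [h, PySem.Chars.lower]
  | cons c rest ih =>
    simp only [List.map_cons, PySem.Chars.split₀.go, pvScanB, pv_isspace_g]
    by_cases hs : pvIsSepB c = true
    · simp only [hs, if_true, List.isEmpty_map]
      by_cases h : cur.isEmpty = true
      · simpa [h] using ih [] acc
      · have := ih [] ((cur.map PySem.Chars.lowerChar).reverse :: acc)
        simp only [List.map_nil] at this ⊢
        simp [h, this, PySem.Chars.lower]
    · simp only [hs, if_false, Bool.false_eq_true]
      have hr : pvToRemoveA.contains c = false := by
        rcases Bool.eq_false_or_eq_true (pvToRemoveA.contains c) with h | h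
        · exact absurd (by unfold pvIsSepB; rw [show pvRemoveB.contains c = true from h, Bool.true_or]) hs
        · exact h
      have := ih (c :: cur) acc
      simp only [List.map_cons] at this
      simp only [pvG, hr, if_false, Bool.false_eq_true]
      exact this

-- ===== VERDICT (by name: the statement is the Claim_ definition above) =====
theorem to_unique_set_spec : Claim_equal_to_unique_set := by
  intro text _
  show _ = _
  simp only [to_unique_set, to_unique_set_alt]
  rw [pv_foldl_app, List.nil_append]
  have hsplit : PySem.Chars.split₀ (text.toList.map pvG)
      = (pvScanB text.toList []).map PySem.Chars.lower := by
    have := pv_split_scan text.toList [] []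
    simpa [PySem.Chars.split₀] using this
  simp [PySem.Str.split₀, hsplit, Function.comp_def]
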